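-- pv_equiv track=rewrite | github.com/veropton/Avoid-Lawsuits-Tweets | AvoidLawsuits.py | converter_em_asteriscos
-- ===== SOURCE A (Python) =====
-- def converter_em_asteriscos(texto):
--     texto_convertido = ''
--     for caractere in texto:
--         if caractere == ' ':
--             texto_convertido += ' '  # Mantém o espaço
--         else:
--             texto_convertido += '*'  # Substitui por asterisco
--
--     return texto_convertido
-- ===== SOURCE B (Python) =====
-- def converter_em_asteriscos(texto):
--     return ' '.join('*' * len(word) for word in texto.split(' '))
-- ===== Notes on version B (the rewrite author's own statement) =====
-- stated objective: faster
-- what changed: Replaces the per-character loop with repeated string concatenation by splitting on the space character, mapping each token to an asterisk run of its length, and joining with spaces.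
import Mathlib
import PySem

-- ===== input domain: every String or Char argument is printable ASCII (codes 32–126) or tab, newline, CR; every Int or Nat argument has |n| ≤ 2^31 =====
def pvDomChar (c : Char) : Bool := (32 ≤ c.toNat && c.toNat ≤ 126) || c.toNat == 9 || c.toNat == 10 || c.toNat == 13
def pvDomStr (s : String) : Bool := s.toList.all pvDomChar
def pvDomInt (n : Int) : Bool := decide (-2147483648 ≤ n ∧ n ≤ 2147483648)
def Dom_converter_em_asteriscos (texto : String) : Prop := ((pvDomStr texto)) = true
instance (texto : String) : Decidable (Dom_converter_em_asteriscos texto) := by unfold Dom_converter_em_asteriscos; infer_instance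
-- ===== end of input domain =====

-- B replaces A's per-character loop by split-on-space / star-each-token / join-with-space (idiomatic decomposition).


-- ===== PORT A =====
-- for caractere in texto: append ' ' if it is a space, else '*'
def converter_em_asteriscos (texto : String) : String :=
  String.mk (texto.toList.foldl (fun acc c => acc ++ (if c == ' ' then [' '] else ['*'])) [])

-- ===== PORT B =====
-- ' '.join('*' * len(word) for word in texto.split(' '))
def converter_em_asteriscos_alt (texto : String) : String :=
  String.mk (PySem.Chars.join [' ']
    ((PySem.Chars.splitOn texto.toList [' ']).map (fun w => List.replicate w.length '*')))

-- ===== PRECONDITION & SPEC =====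
def Spec_converter_em_asteriscos (texto : String) (out : String) : Prop := out = converter_em_asteriscos_alt texto
instance (texto : String) (out : String) : Decidable (Spec_converter_em_asteriscos texto out) := by unfold Spec_converter_em_asteriscos; infer_instance

-- ===== CLAIM (what is proved, stated in full; the proofs are below) =====
def Claim_equal_converter_em_asteriscos : Prop := ∀ (texto : String), Dom_converter_em_asteriscos texto → Spec_converter_em_asteriscos texto (converter_em_asteriscos texto)

-- ===== LEMMAS AND PROOFS =====

-- the character-level map both sides compute
def pvStar (c : Char) : Char := if c == ' ' then ' ' else '*'

-- simple recursive characterisation of split on a single space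
def pvSp : List Char → List (List Char)
  | [] => [[]]
  | c :: rest =>
    if c = ' ' then [] :: pvSp rest
    else
      match pvSp rest with
      | p :: ps => (c :: p) :: ps
      | [] => [[c]]

lemma pvSp_ne_nil (l : List Char) : pvSp l ≠ [] := by
  cases l with
  | nil => simp [pvSp]
  | cons c rest =>
    simp only [pvSp]
    split
    · simp
    · split <;> simp

lemma splitOn_go_eq (fuel : Nat) : ∀ (l cur : List Char) (acc : List (List Char)),
    l.length < fuel →
    PySem.Chars.splitOn.go [' '] fuel l cur acc
      = acc.reverse ++ (pvSp l).modifyHead (fun p => cur.reverse ++ p) := by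
  induction fuel with
  | zero => intro l cur acc h; omega
  | succ n ih =>
    intro l cur acc h
    cases l with
    | nil =>
      simp [PySem.Chars.splitOn.go, pvSp]
    | cons c rest =>
      by_cases hc : c = ' '
      · have hpre : List.isPrefixOf [' '] (c :: rest) = true := by
          simp [List.isPrefixOf, hc]
        rw [PySem.Chars.splitOn.go]
        simp only [hpre, if_true]
        have hlen : rest.length < n := by simpa using Nat.lt_of_succ_lt_succ h
        rw [show List.drop [' '].length (c :: rest) = rest by simp]
        rw [ih rest [] (cur.reverse :: acc) hlen]
        rcases hsp : pvSp rest with _ | ⟨p, ps⟩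
        · exact absurd hsp (pvSp_ne_nil rest)
        · simp [pvSp, hc, hsp]
      · have hpre : List.isPrefixOf [' '] (c :: rest) = false := by
          simp [List.isPrefixOf]
          exact fun h' => hc h'.symm
        rw [PySem.Chars.splitOn.go]
        simp only [hpre]
        have hlen : rest.length < n := by simpa using Nat.lt_of_succ_lt_succ h
        rw [if_neg (by simp)]
        rw [ih rest (c :: cur) acc hlen]
        rcases hsp : pvSp rest with _ | ⟨p, ps⟩
        · exact absurd hsp (pvSp_ne_nil rest)
        · simp [pvSp, hc, hsp]

lemma splitOn_eq_pvSp (l : List Char) : PySem.Chars.splitOn l [' '] = pvSp l := by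
  rw [PySem.Chars.splitOn, splitOn_go_eq (l.length + 1) l [] [] (by omega)]
  rcases hsp : pvSp l with _ | ⟨p, ps⟩
  · exact absurd hsp (pvSp_ne_nil l)
  · simp

lemma intercalate_cons (sep x : List Char) (l : List (List Char)) :
    List.intercalate sep (x :: l) = x ++ (if l = [] then [] else sep ++ List.intercalate sep l) := by
  cases l with
  | nil => simp [List.intercalate]
  | cons y t => simp [List.intercalate, List.intersperse, List.flatten]

lemma join_sp_eq_map (l : List Char) :
    PySem.Chars.join [' '] ((pvSp l).map (fun w => List.replicate w.length '*')) = l.map pvStar := by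
  induction l with
  | nil => simp [pvSp, PySem.Chars.join, List.intercalate]
  | cons c rest ih =>
    by_cases hc : c = ' '
    · have hne : (pvSp rest).map (fun w => List.replicate w.length '*') ≠ [] := by
        simpa using pvSp_ne_nil rest
      simp only [pvSp, hc, if_true, List.map_cons]
      rw [PySem.Chars.join, intercalate_cons, if_neg hne]
      simp only [List.length_nil, List.replicate_zero, List.nil_append]
      rw [← PySem.Chars.join, ih]
      simp [pvStar, hc]
    · rcases hsp : pvSp rest with _ | ⟨p, ps⟩
      · exact absurd hsp (pvSp_ne_nil rest)
      · simp only [pvSp, if_neg hc, hsp, List.map_cons]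
        have key : List.replicate (c :: p).length '*' = '*' :: List.replicate p.length '*' := by
          simp [List.replicate]
        rw [PySem.Chars.join, key, show ('*' :: List.replicate p.length '*') = ['*'] ++ List.replicate p.length '*' from rfl]
        rw [show (['*'] ++ List.replicate p.length '*') :: (ps.map (fun w => List.replicate w.length '*'))
              = (['*'] ++ List.replicate p.length '*') :: (ps.map (fun w => List.replicate w.length '*')) from rfl]
        rw [intercalate_cons, List.append_assoc, ← intercalate_cons]
        rw [← PySem.Chars.join, show (List.replicate p.length '*' :: ps.map (fun w => List.replicate w.length '*'))
              = ((p :: ps).map (fun w => List.replicate w.length '*')) from rfl, ← hsp, ih]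
        simp [pvStar, hc]

lemma foldl_append_map (l : List Char) (acc : List Char) :
    l.foldl (fun acc c => acc ++ (if c == ' ' then [' '] else ['*'])) acc = acc ++ l.map pvStar := by
  induction l generalizing acc with
  | nil => simp
  | cons c rest ih =>
    simp only [List.foldl_cons, List.map_cons, ih]
    by_cases hc : c = ' ' <;> simp [pvStar, hc]

-- ===== VERDICT (by name: the statement is the Claim_ definition above) =====
theorem converter_em_asteriscos_spec : Claim_equal_converter_em_asteriscos := by
  intro texto _
  unfold Spec_converter_em_asteriscos converter_em_asteriscos converter_em_asteriscos_alt
  rw [splitOn_eq_pvSp, join_sp_eq_map, foldl_append_map]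
  simp
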